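-- pv_equiv track=rewrite | github.com/jaidevjoshi83/ChemDock | ChemStructure/Chem/views.py | GetSDFProperties
-- ===== SOURCE A (Python) =====
-- def GetSDFProperties(lines):
--     keys = {}
--     temp = []
--     for i, x in enumerate (lines):
--         if '> <' in x:
--             temp.append(i)
--     for j, x in enumerate(temp):
--         try:
--             keys[lines[temp[j]].replace('> <', '').replace('>\n', '')] = lines[temp[j]+1: temp[j+1]-1]
--         except:
--             pass
--     return keys
-- ===== SOURCE B (Python) =====
-- def GetSDFProperties(lines):
--     keys = {}
--     pending = None  # (index of last marker line seen, its cleaned key)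
--     for i, x in enumerate(lines):
--         if '> <' in x:
--             if pending is not None:
--                 pi, pk = pending
--                 keys[pk] = lines[pi + 1: i - 1]
--             pending = (i, x.replace('> <', '').replace('>\n', ''))
--     return keys
-- ===== Notes on version B (the rewrite author's own statement) =====
-- stated objective: simpler
-- what changed: Single pass over enumerate(lines) carrying a pending (index, key) marker instead of first collecting a list of marker indices and then indexing into it with try/except; the last pending marker is naturally never finalized, matching A's dropped last property.
import Mathlib
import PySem

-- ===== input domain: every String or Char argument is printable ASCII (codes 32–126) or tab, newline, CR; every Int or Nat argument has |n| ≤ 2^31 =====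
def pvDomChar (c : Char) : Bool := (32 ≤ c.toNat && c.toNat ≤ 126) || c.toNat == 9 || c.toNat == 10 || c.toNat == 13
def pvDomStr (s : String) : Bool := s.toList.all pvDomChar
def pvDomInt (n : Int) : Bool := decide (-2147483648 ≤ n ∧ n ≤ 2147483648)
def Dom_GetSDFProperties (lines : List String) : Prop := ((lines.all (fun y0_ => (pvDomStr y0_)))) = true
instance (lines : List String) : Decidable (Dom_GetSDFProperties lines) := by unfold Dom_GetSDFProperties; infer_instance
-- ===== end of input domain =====

-- B is a single pass keeping a pending (index, key) marker instead of A's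
-- index-list plus try/except second loop; same return value (simpler decomposition).

-- ===== PORT A =====
-- key cleaning used by both Pythons: x.replace('> <','').replace('>\n','')
def pvCleanKey (x : String) : String :=
  PySem.Str.replace (PySem.Str.replace x "> <" "") ">\n" ""

def GetSDFProperties (lines : List String) : List (String × List String) :=
  -- temp = [i for i,x in enumerate(lines) if '> <' in x]
  let temp : List Int :=
    (PySem.List.enumerate lines 0).foldl
      (fun acc p => if PySem.Str.isIn "> <" p.2 then acc ++ [p.1] else acc) []
  -- for j, x in enumerate(temp): try: keys[lines[temp[j]].replace...] = lines[temp[j]+1:temp[j+1]-1] except: pass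
  let keys : PySem.Dict String (List String) :=
    (PySem.List.enumerate temp 0).foldl
      (fun keys p =>
        match PySem.List.pyGet? temp p.1, PySem.List.pyGet? temp (p.1 + 1) with
        | some t, some tn =>
          match PySem.List.pyGet? lines t with
          | some line =>
              keys.insert (pvCleanKey line)
                (PySem.List.slice lines (some (t + 1)) (some (tn - 1)))
          | none => keys
        | _, _ => keys)
      PySem.Dict.empty
  keys.items

-- ===== PORT B =====
def GetSDFProperties_alt (lines : List String) : List (String × List String) :=
  let st :=
    (PySem.List.enumerate lines 0).foldl
      (fun (st : PySem.Dict String (List String) × Option (Int × String)) p =>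
        if PySem.Str.isIn "> <" p.2 then
          match st.2 with
          | some (pi, pk) =>
              (st.1.insert pk (PySem.List.slice lines (some (pi + 1)) (some (p.1 - 1))),
               some (p.1, pvCleanKey p.2))
          | none => (st.1, some (p.1, pvCleanKey p.2))
        else st)
      (PySem.Dict.empty, none)
  st.1.items

-- ===== PRECONDITION & SPEC =====
def Spec_GetSDFProperties (lines : List String) (out : List (String × List String)) : Prop := out = GetSDFProperties_alt lines
instance (lines : List String) (out : List (String × List String)) : Decidable (Spec_GetSDFProperties lines out) := by unfold Spec_GetSDFProperties; infer_instance

-- ===== CLAIM (what is proved, stated in full; the proofs are below) =====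
def Claim_equal_GetSDFProperties : Prop := ∀ (lines : List String), Dom_GetSDFProperties lines → Spec_GetSDFProperties lines (GetSDFProperties lines)

-- ===== LEMMAS AND PROOFS =====

-- the marker lines with their indices
def pvMarkers (lines : List String) : List (Int × String) :=
  (PySem.List.enumerate lines 0).filter (fun p => PySem.Str.isIn "> <" p.2)

-- A's second-loop body, named (definitionally the lambda in the port)
def pvBodyA (lines : List String) (temp : List Int)
    (keys : PySem.Dict String (List String)) (p : Int × Int) :
    PySem.Dict String (List String) :=
  match PySem.List.pyGet? temp p.1, PySem.List.pyGet? temp (p.1 + 1) with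
  | some t, some tn =>
    match PySem.List.pyGet? lines t with
    | some line =>
        keys.insert (pvCleanKey line)
          (PySem.List.slice lines (some (t + 1)) (some (tn - 1)))
    | none => keys
  | _, _ => keys

-- B's pending-threading step on a marker (the match inside B's loop), named
def pvStepB (lines : List String)
    (st : PySem.Dict String (List String) × Option (Int × String)) (p : Int × String) :
    PySem.Dict String (List String) × Option (Int × String) :=
  match st.2 with
  | some (pi, pk) =>
      (st.1.insert pk (PySem.List.slice lines (some (pi + 1)) (some (p.1 - 1))),
       some (p.1, pvCleanKey p.2))
  | none => (st.1, some (p.1, pvCleanKey p.2))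

-- common adjacency fold both ports reduce to
def pvAdj (lines : List String) (d : PySem.Dict String (List String)) :
    List (Int × String) → PySem.Dict String (List String)
  | (a, sa) :: (b, sb) :: r =>
      pvAdj lines
        (d.insert (pvCleanKey sa) (PySem.List.slice lines (some (a + 1)) (some (b - 1))))
        ((b, sb) :: r)
  | _ => d

lemma pvBodyA_some (lines : List String) (temp : List Int)
    (keys : PySem.Dict String (List String)) (p : Int × Int)
    (t tn : Int) (line : String)
    (h1 : PySem.List.pyGet? temp p.1 = some t)
    (h2 : PySem.List.pyGet? temp (p.1 + 1) = some tn)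
    (h3 : PySem.List.pyGet? lines t = some line) :
    pvBodyA lines temp keys p
      = keys.insert (pvCleanKey line)
          (PySem.List.slice lines (some (t + 1)) (some (tn - 1))) := by
  simp [pvBodyA, h1, h2, h3]

lemma pvBodyA_last (lines : List String) (temp : List Int)
    (keys : PySem.Dict String (List String)) (p : Int × Int)
    (h2 : PySem.List.pyGet? temp (p.1 + 1) = none) :
    pvBodyA lines temp keys p = keys := by
  cases h : PySem.List.pyGet? temp p.1 <;> simp [pvBodyA, h, h2]

lemma pvMarkers_get (lines : List String) :
    ∀ p ∈ pvMarkers lines, PySem.List.pyGet? lines p.1 = some p.2 := by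
  intro p hp
  have hp' := List.mem_of_mem_filter hp
  rw [PySem.List.mem_enumerate_iff] at hp'
  obtain ⟨k, hk, rfl⟩ := hp'
  simp [hk]


-- B's whole loop body with the marker test, named (definitionally the lambda in the port)
def pvStepB' (lines : List String)
    (st : PySem.Dict String (List String) × Option (Int × String)) (p : Int × String) :
    PySem.Dict String (List String) × Option (Int × String) :=
  if PySem.Str.isIn "> <" p.2 then pvStepB lines st p else st

lemma pvStepB'_eq (lines : List String) (a : PySem.Dict String (List String) × Option (Int × String))
    (xs : List (Int × String)) :
    List.foldl (pvStepB' lines) a xs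
      = List.foldl (fun st p => if PySem.Str.isIn "> <" p.2 then pvStepB lines st p else st) a xs := rfl

-- generic: a fold that skips non-c elements is a fold over the filter
lemma pv_foldl_filter {α β : Type} (c : β → Bool) (f : α → β → α) (a : α) (xs : List β) :
    List.foldl (fun st p => if c p then f st p else st) a xs = List.foldl f a (xs.filter c) := by
  induction xs generalizing a with
  | nil => rfl
  | cons x xs ih => by_cases h : c x <;> simp [h, ih]

-- generic: 'if c(x): out.append(f(x))' collects the filtered images
lemma pv_foldl_append_if {α β : Type} (c : α → Bool) (f : α → β) (acc : List β) (xs : List α) :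
    List.foldl (fun acc x => if c x then acc ++ [f x] else acc) acc xs
      = acc ++ (xs.filter c).map f := by
  induction xs generalizing acc with
  | nil => simp
  | cons x xs ih => by_cases h : c x <;> simp [h, ih]

-- B's fold over the markers equals pvAdj (pending threading)
lemma pv_foldB (lines : List String) :
    ∀ (M : List (Int × String)) (d : PySem.Dict String (List String)),
      ((List.foldl (pvStepB lines) (d, none) M).1 = pvAdj lines d M)
    ∧ ∀ (a : Int) (sa : String),
      (List.foldl (pvStepB lines) (d, some (a, pvCleanKey sa)) M).1
        = pvAdj lines d ((a, sa) :: M) := by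
  intro M
  induction M with
  | nil => intro d; exact ⟨rfl, fun a sa => rfl⟩
  | cons p r ih =>
    intro d
    obtain ⟨i, x⟩ := p
    constructor
    · simpa [pvStepB] using (ih d).2 i x
    · intro a sa
      simpa [pvStepB, pvAdj] using
        (ih (d.insert (pvCleanKey sa) (PySem.List.slice lines (some (a + 1)) (some (i - 1))))).2 i x

-- A's second fold, walked along the marker list
lemma pv_foldA (lines : List String) (M : List (Int × String)) :
    ∀ (rest done : List (Int × String)) (d : PySem.Dict String (List String)),
      M = done ++ rest →
      (∀ p ∈ rest, PySem.List.pyGet? lines p.1 = some p.2) →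
      List.foldl (pvBodyA lines (M.map (·.1))) d
        (PySem.List.enumerate (rest.map (·.1)) (done.length : Int))
        = pvAdj lines d rest := by
  intro rest
  induction rest with
  | nil => intro done d _ _; simp [PySem.List.enumerate_nil, pvAdj]
  | cons p r ih =>
    intro done d hM hget
    obtain ⟨a, sa⟩ := p
    have ht : PySem.List.pyGet? (M.map (·.1)) (done.length : Int) = some a := by
      have h : (M.map (·.1))[done.length]? = some a := by
        subst hM; simp
      simp [h]
    have hline : PySem.List.pyGet? lines a = some sa := hget (a, sa) (by simp)
    cases r with
    | nil =>
      have htn : PySem.List.pyGet? (M.map (·.1)) ((done.length : Int) + 1) = none := by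
        have h : (M.map (·.1))[done.length + 1]? = none := by
          subst hM; apply List.getElem?_eq_none; simp
        have h2 : (done.length : Int) + 1 = ((done.length + 1 : Nat) : Int) := by push_cast; ring
        rw [h2, PySem.List.pyGet?_natCast, h]
      rw [List.map_cons, List.map_nil, PySem.List.enumerate_cons, PySem.List.enumerate_nil,
        List.foldl_cons, List.foldl_nil, pvBodyA_last lines _ d _ htn]
      rfl
    | cons q r' =>
      obtain ⟨b, sb⟩ := q
      have htn : PySem.List.pyGet? (M.map (·.1)) ((done.length : Int) + 1) = some b := by
        have h : (M.map (·.1))[done.length + 1]? = some b := by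
          subst hM
          rw [List.map_append, List.getElem?_append_right (by simp)]
          simp
        have h2 : (done.length : Int) + 1 = ((done.length + 1 : Nat) : Int) := by push_cast; ring
        rw [h2, PySem.List.pyGet?_natCast, h]
      have hM' : M = (done ++ [(a, sa)]) ++ ((b, sb) :: r') := by subst hM; simp
      have hget' : ∀ p ∈ (b, sb) :: r', PySem.List.pyGet? lines p.1 = some p.2 :=
        fun p hp => hget p (List.mem_cons_of_mem _ hp)
      have ihres := ih (done ++ [(a, sa)])
        (d.insert (pvCleanKey sa) (PySem.List.slice lines (some (a + 1)) (some (b - 1))))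
        hM' hget'
      rw [List.map_cons, PySem.List.enumerate_cons, List.foldl_cons,
        pvBodyA_some lines _ d _ a b sa ht htn hline,
        show (done.length : Int) + 1 = ((done ++ [(a, sa)]).length : Int) by simp]
      exact ihres

-- ===== VERDICT (by name: the statement is the Claim_ definition above) =====
theorem GetSDFProperties_spec : Claim_equal_GetSDFProperties := by
  intro lines _
  unfold Spec_GetSDFProperties GetSDFProperties GetSDFProperties_alt
  show (List.foldl
          (pvBodyA lines
            ((PySem.List.enumerate lines 0).foldl
              (fun acc p => if PySem.Str.isIn "> <" p.2 then acc ++ [p.1] else acc) []))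
          PySem.Dict.empty
          (PySem.List.enumerate
            ((PySem.List.enumerate lines 0).foldl
              (fun acc p => if PySem.Str.isIn "> <" p.2 then acc ++ [p.1] else acc) []) 0)).items
      = (List.foldl (pvStepB' lines) (PySem.Dict.empty, none) (PySem.List.enumerate lines 0)).1.items
  have hTemp : (PySem.List.enumerate lines 0).foldl
      (fun acc p => if PySem.Str.isIn "> <" p.2 then acc ++ [p.1] else acc) []
      = (pvMarkers lines).map (·.1) := by
    simpa [pvMarkers] using
      pv_foldl_append_if (fun p : Int × String => PySem.Str.isIn "> <" p.2) (fun p => p.1) []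
        (PySem.List.enumerate lines 0)
  have hFilt : List.foldl
      (fun st p => if PySem.Str.isIn "> <" p.2 then pvStepB lines st p else st)
      ((PySem.Dict.empty : PySem.Dict String (List String)), (none : Option (Int × String)))
      (PySem.List.enumerate lines 0)
      = List.foldl (pvStepB lines) (PySem.Dict.empty, none) (pvMarkers lines) := by
    simpa [pvMarkers] using
      pv_foldl_filter (fun p : Int × String => PySem.Str.isIn "> <" p.2) (pvStepB lines)
        (PySem.Dict.empty, none) (PySem.List.enumerate lines 0)
  rw [hTemp, pvStepB'_eq, hFilt, (pv_foldB lines (pvMarkers lines) PySem.Dict.empty).1]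
  have hA := pv_foldA lines (pvMarkers lines) (pvMarkers lines) [] PySem.Dict.empty
    rfl (pvMarkers_get lines)
  rw [List.length_nil, Nat.cast_zero] at hA
  rw [hA]
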